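-- pv_equiv track=rewrite | github.com/armpit-symphony/sparkpit | backend/server.py | build_bot_handle_seed
-- ===== SOURCE A (Python) =====
-- from typing import List, Optional, Dict, Any, Tuple
--
-- def build_bot_handle_seed(value: str) -> str:
--     chars: List[str] = []
--     for char in (value or "").lower():
--         if char.isalnum():
--             chars.append(char)
--             continue
--         if chars and chars[-1] != "-":
--             chars.append("-")
--     seed = "".join(chars).strip("-")
--     return seed or "agent"
-- ===== SOURCE B (Python) =====
-- def build_bot_handle_seed(value: str) -> str:
--     s = (value or "").lower()
--     segments = []
--     i, n = 0, len(s)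
--     while i < n:
--         if s[i].isalnum():
--             j = i
--             while j < n and s[j].isalnum():
--                 j += 1
--             segments.append(s[i:j])
--             i = j
--         else:
--             i += 1
--     return "-".join(segments) or "agent"
-- ===== Notes on version B (the rewrite author's own statement) =====
-- stated objective: alternative
-- what changed: B extracts maximal alphanumeric runs as segments and joins them with dash separators, instead of A's char-by-char state machine that emits separator dashes and then strips edge dashes.
import Mathlib
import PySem

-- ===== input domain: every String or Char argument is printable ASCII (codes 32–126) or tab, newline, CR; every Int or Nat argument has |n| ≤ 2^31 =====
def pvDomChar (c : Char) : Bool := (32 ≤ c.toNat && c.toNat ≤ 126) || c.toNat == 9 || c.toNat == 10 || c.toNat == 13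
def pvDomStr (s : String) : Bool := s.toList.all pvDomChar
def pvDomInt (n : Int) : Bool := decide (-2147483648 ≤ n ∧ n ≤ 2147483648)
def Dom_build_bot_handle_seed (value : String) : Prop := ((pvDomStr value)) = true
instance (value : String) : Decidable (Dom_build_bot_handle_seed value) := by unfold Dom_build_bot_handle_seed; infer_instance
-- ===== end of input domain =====

-- B extracts maximal alphanumeric runs and joins them with dash separators instead of A's
-- char-by-char dash-emitting state machine followed by strip('-'); alternative decomposition, same cost.


-- ===== PORT A =====
-- loop body: append alnum chars; on a non-alnum char append '-' if chars nonempty and last ≠ '-'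
def pvStepA (acc : List Char) (c : Char) : List Char :=
  if PySem.Chars.isalnum c then acc ++ [c]
  else if acc ≠ [] ∧ acc.getLast? ≠ some '-' then acc ++ ['-'] else acc

-- 'value or ""' equals value for strings (falsy string IS ""), so it is ported as value itself
def build_bot_handle_seed (value : String) : String :=
  let chars := ((PySem.Str.lower value).toList).foldl pvStepA []
  let seed := PySem.Chars.stripChars chars ['-']   -- "".join(chars).strip("-")
  if seed = [] then "agent" else String.ofList seed    -- seed or "agent"

-- ===== PORT B =====
-- the outer while-loop of B: skip non-alnum chars; at an alnum char take the maximal alnum run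
def pvSegsB (cs : List Char) : List (List Char) :=
  match cs with
  | [] => []
  | c :: rest =>
    if PySem.Chars.isalnum c then
      (c :: rest.takeWhile PySem.Chars.isalnum) :: pvSegsB (rest.dropWhile PySem.Chars.isalnum)
    else pvSegsB rest
termination_by cs.length
decreasing_by
  · exact Nat.lt_succ_of_le (List.length_dropWhile_le _ _)
  · exact Nat.lt_succ_self _

def build_bot_handle_seed_alt (value : String) : String :=
  let segs := pvSegsB (PySem.Str.lower value).toList
  if segs = [] then "agent" else String.ofList (PySem.Chars.join ['-'] segs)   -- "-".join(segments) or "agent"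

-- ===== PRECONDITION & SPEC =====
def Spec_build_bot_handle_seed (value : String) (out : String) : Prop := out = build_bot_handle_seed_alt value
instance (value : String) (out : String) : Decidable (Spec_build_bot_handle_seed value out) := by unfold Spec_build_bot_handle_seed; infer_instance

-- ===== CLAIM (what is proved, stated in full; the proofs are below) =====
def Claim_equal_build_bot_handle_seed : Prop := ∀ (value : String), Dom_build_bot_handle_seed value → Spec_build_bot_handle_seed value (build_bot_handle_seed value)

-- ===== LEMMAS AND PROOFS =====

-- semantic rendering of A's loop: the Bool says whether chars is nonempty with last ≠ '-'
def encA : Bool → List Char → List Char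
  | _, [] => []
  | b, c :: rest =>
    if PySem.Chars.isalnum c then c :: encA true rest
    else if b then '-' :: encA false rest else encA false rest

lemma alnum_ne_dash {c : Char} (h : PySem.Chars.isalnum c = true) : c ≠ '-' := by
  rintro rfl; exact absurd h (by decide)
lemma foldl_pvStepA : ∀ (cs acc : List Char) (b : Bool),
    (b = true ↔ (acc ≠ [] ∧ acc.getLast? ≠ some '-')) →
    cs.foldl pvStepA acc = acc ++ encA b cs := by
  intro cs
  induction cs with
  | nil => intro acc b _; simp [encA]
  | cons c rest ih =>
    intro acc b hb
    by_cases hc : PySem.Chars.isalnum c = true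
    · have step : pvStepA acc c = acc ++ [c] := by simp [pvStepA, hc]
      have h2 : (true = true) ↔ ((acc ++ [c]) ≠ [] ∧ (acc ++ [c]).getLast? ≠ some '-') := by
        simp
        exact fun h => alnum_ne_dash hc h
      calc (c :: rest).foldl pvStepA acc = rest.foldl pvStepA (acc ++ [c]) := by
              simp [List.foldl_cons, step]
        _ = (acc ++ [c]) ++ encA true rest := ih _ true h2
        _ = acc ++ encA b (c :: rest) := by simp [encA, hc]
    · cases b with
      | true =>
        have hacc := hb.mp rfl
        have step : pvStepA acc c = acc ++ ['-'] := by simp [pvStepA, hc, hacc.1, hacc.2]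
        have h2 : (false = true) ↔ ((acc ++ ['-']) ≠ [] ∧ (acc ++ ['-']).getLast? ≠ some '-') := by
          simp
        calc (c :: rest).foldl pvStepA acc = rest.foldl pvStepA (acc ++ ['-']) := by
              simp [List.foldl_cons, step]
          _ = (acc ++ ['-']) ++ encA false rest := ih _ false h2
          _ = acc ++ encA true (c :: rest) := by simp [encA, hc]
      | false =>
        have hcond : ¬ (acc ≠ [] ∧ acc.getLast? ≠ some '-') := fun h => absurd (hb.mpr h) (by simp)
        have step : pvStepA acc c = acc := by unfold pvStepA; rw [if_neg hc, if_neg hcond]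
        calc (c :: rest).foldl pvStepA acc = rest.foldl pvStepA acc := by simp [List.foldl_cons, step]
          _ = acc ++ encA false rest := ih _ false hb
          _ = acc ++ encA false (c :: rest) := by simp [encA, hc]

lemma encA_true_run (xs : List Char) (h : ∀ c ∈ xs, PySem.Chars.isalnum c = true) (r : List Char) :
    encA true (xs ++ r) = xs ++ encA true r := by
  induction xs with
  | nil => simp
  | cons x xs ih =>
    have hx := h x (by simp)
    simp only [List.cons_append, encA, hx, if_pos]
    rw [ih (fun c hc => h c (by simp [hc]))]

lemma dropWhile_head_not {p : Char → Bool} : ∀ (xs : List Char) {d ds},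
    xs.dropWhile p = d :: ds → p d = false := by
  intro xs
  induction xs with
  | nil => intro d ds h; simp [List.dropWhile] at h
  | cons x xs ih =>
    intro d ds h
    by_cases hx : p x = true
    · rw [List.dropWhile_cons_of_pos hx] at h; exact ih h
    · rw [List.dropWhile_cons_of_neg hx] at h
      cases h; simpa using hx

lemma segsB_wf : ∀ (cs : List Char), ∀ s ∈ pvSegsB cs, s ≠ [] ∧ ∀ c ∈ s, PySem.Chars.isalnum c = true := by
  intro cs
  induction cs using pvSegsB.induct with
  | case1 => simp [pvSegsB]
  | case2 c rest hc ih =>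
    intro s hs
    rw [pvSegsB, if_pos hc] at hs
    rcases List.mem_cons.mp hs with rfl | hs
    · refine ⟨by simp, ?_⟩
      intro x hx
      rcases List.mem_cons.mp hx with rfl | hx
      · exact hc
      · exact List.mem_takeWhile_imp hx
    · exact ih s hs
  | case3 c rest hc ih =>
    intro s hs
    rw [pvSegsB, if_neg hc] at hs
    exact ih s hs

lemma join_head (s : List Char) (ss : List (List Char)) :
    ∃ r, PySem.Chars.join ['-'] (s :: ss) = s ++ r := by
  cases ss with
  | nil => exact ⟨[], by simp [PySem.Chars.join_singleton]⟩
  | cons s' ss => exact ⟨'-' :: PySem.Chars.join ['-'] (s' :: ss), by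
      rw [PySem.Chars.join_cons_cons]; simp⟩

lemma join_last : ∀ (L : List (List Char)),
    (∀ s ∈ L, s ≠ [] ∧ ∀ c ∈ s, PySem.Chars.isalnum c = true) → L ≠ [] →
    ∃ l, (PySem.Chars.join ['-'] L).getLast? = some l ∧ PySem.Chars.isalnum l = true := by
  intro L
  induction L with
  | nil => simp
  | cons s ss ih =>
    intro h _
    cases ss with
    | nil =>
      obtain ⟨hne, hal⟩ := h s (by simp)
      refine ⟨s.getLast hne, ?_, hal _ (List.getLast_mem hne)⟩
      rw [PySem.Chars.join_singleton]; exact List.getLast?_eq_some_getLast hne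
    | cons s' ss' =>
      obtain ⟨l, hl, hal⟩ := ih (fun x hx => h x (by simp [hx])) (by simp)
      refine ⟨l, ?_, hal⟩
      rw [PySem.Chars.join_cons_cons]
      have hne : PySem.Chars.join ['-'] (s' :: ss') ≠ [] := by
        intro hn; rw [hn] at hl; simp at hl
      rw [List.getLast?_append_of_ne_nil]
      · exact hl
      · exact hne

lemma encA_false_eq : ∀ (cs : List Char), ∃ t, (t = [] ∨ t = ['-']) ∧
    encA false cs = PySem.Chars.join ['-'] (pvSegsB cs) ++ t ∧ (pvSegsB cs = [] → t = []) := by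
  intro cs
  induction cs using pvSegsB.induct with
  | case1 => exact ⟨[], Or.inl rfl, by simp [encA, pvSegsB, PySem.Chars.join_nil], fun _ => rfl⟩
  | case2 c rest hc ih =>
    rw [pvSegsB, if_pos hc]
    have hrest : rest = rest.takeWhile PySem.Chars.isalnum ++ rest.dropWhile PySem.Chars.isalnum :=
      (List.takeWhile_append_dropWhile).symm
    have htw : ∀ x ∈ rest.takeWhile PySem.Chars.isalnum, PySem.Chars.isalnum x = true :=
      fun x hx => List.mem_takeWhile_imp hx
    have h1 : encA false (c :: rest)
        = c :: (rest.takeWhile PySem.Chars.isalnum ++ encA true (rest.dropWhile PySem.Chars.isalnum)) := by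
      conv_lhs => rw [hrest]
      simp only [encA, hc, if_pos]
      rw [encA_true_run _ htw]
    cases hdw : rest.dropWhile PySem.Chars.isalnum with
    | nil =>
      refine ⟨[], Or.inl rfl, ?_, fun _ => rfl⟩
      rw [h1, hdw]
      simp [show pvSegsB [] = [] from by simp [pvSegsB], PySem.Chars.join_singleton, encA]
    | cons d ds =>
      have hd : PySem.Chars.isalnum d = false := dropWhile_head_not rest hdw
      have h2 : encA true (d :: ds) = '-' :: encA false ds := by
        simp [encA, hd]
      have h3 : encA false (d :: ds) = encA false ds := by
        simp [encA, hd]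
      rw [hdw] at ih
      obtain ⟨t, ht, heq, hnil⟩ := ih
      rw [h3] at heq
      cases hsegs : pvSegsB (d :: ds) with
      | nil =>
        refine ⟨['-'], Or.inr rfl, ?_, by simp⟩
        rw [h1, hdw, h2, heq, hsegs, hnil hsegs]
        simp [PySem.Chars.join_nil, PySem.Chars.join_singleton]
      | cons s' ss' =>
        refine ⟨t, ht, ?_, by simp⟩
        rw [h1, hdw, h2, heq, hsegs, PySem.Chars.join_cons_cons]
        simp
  | case3 c rest hc ih =>
    rw [pvSegsB, if_neg hc]
    obtain ⟨t, ht, heq, hnil⟩ := ih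
    exact ⟨t, ht, by simp [encA, hc, heq], hnil⟩

lemma strip_aux (js t : List Char) (ht : t = [] ∨ t = ['-'])
    (hhead : ∀ h, js.head? = some h → PySem.Chars.isalnum h = true)
    (hlast : ∀ l, js.getLast? = some l → PySem.Chars.isalnum l = true)
    (hnil : js = [] → t = []) :
    PySem.Chars.stripChars (js ++ t) ['-'] = js := by
  have ne_dash : ∀ c : Char, PySem.Chars.isalnum c = true → ¬ (['-'].contains c = true) := by
    intro c hc hp
    simp at hp
    subst hp
    exact absurd hc (by decide)
  cases js with
  | nil => rw [hnil rfl]; decide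
  | cons h js' =>
    have hh : PySem.Chars.isalnum h = true := hhead h rfl
    obtain ⟨l, hl⟩ : ∃ l, (h :: js').getLast? = some l := ⟨_, List.getLast?_eq_some_getLast (by simp)⟩
    have hlal : PySem.Chars.isalnum l = true := hlast l hl
    have hrev : (h :: js').reverse.head? = some l := by
      rw [List.head?_reverse]; exact hl
    obtain ⟨rs, hrs⟩ : ∃ rs, (h :: js').reverse = l :: rs := by
      cases hr : (h :: js').reverse with
      | nil => rw [hr] at hrev; exact absurd hrev (by simp)
      | cons a as => rw [hr] at hrev; exact ⟨as, by simp_all⟩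
    simp only [PySem.Chars.stripChars]
    have hdrop1 : List.dropWhile (fun c => ['-'].contains c) ((h :: js') ++ t) = (h :: js') ++ t := by
      rw [List.cons_append, List.dropWhile_cons_of_neg (ne_dash h hh)]
    rw [hdrop1]
    rw [List.reverse_append, hrs]
    have hdrop2 : List.dropWhile (fun c => ['-'].contains c) (t.reverse ++ l :: rs) = l :: rs := by
      rcases ht with rfl | rfl
      · simp only [List.reverse_nil, List.nil_append]
        rw [List.dropWhile_cons_of_neg (ne_dash l hlal)]
      · simp only [List.reverse_cons, List.reverse_nil, List.nil_append, List.cons_append]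
        rw [List.dropWhile_cons_of_pos (by decide), List.dropWhile_cons_of_neg (ne_dash l hlal)]
    rw [hdrop2, ← hrs, List.reverse_reverse]

-- ===== VERDICT (by name: the statement is the Claim_ definition above) =====
theorem build_bot_handle_seed_spec : Claim_equal_build_bot_handle_seed := by
  intro value _
  unfold Spec_build_bot_handle_seed build_bot_handle_seed build_bot_handle_seed_alt
  have hwf := segsB_wf (PySem.Str.lower value).toList
  have hfold : (PySem.Str.lower value).toList.foldl pvStepA []
      = encA false (PySem.Str.lower value).toList := by
    simpa using foldl_pvStepA (PySem.Str.lower value).toList [] false (by simp)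
  obtain ⟨t, ht, heq, hnilt⟩ := encA_false_eq (PySem.Str.lower value).toList
  have hJnil : pvSegsB (PySem.Str.lower value).toList = [] ↔
      PySem.Chars.join ['-'] (pvSegsB (PySem.Str.lower value).toList) = [] := by
    constructor
    · rintro h; rw [h, PySem.Chars.join_nil]
    · intro hj
      cases hSc : pvSegsB (PySem.Str.lower value).toList with
      | nil => rfl
      | cons s ss =>
        obtain ⟨r, hr⟩ := join_head s ss
        obtain ⟨hs0, -⟩ := hwf s (by rw [hSc]; exact List.mem_cons_self)
        rw [hSc, hr] at hj
        cases s with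
        | nil => exact absurd rfl hs0
        | cons a s' => simp at hj
  have hstrip : PySem.Chars.stripChars ((PySem.Str.lower value).toList.foldl pvStepA []) ['-']
      = PySem.Chars.join ['-'] (pvSegsB (PySem.Str.lower value).toList) := by
    rw [hfold, heq]
    apply strip_aux _ _ ht
    · intro h hh
      cases hSc : pvSegsB (PySem.Str.lower value).toList with
      | nil => rw [hSc, PySem.Chars.join_nil] at hh; simp at hh
      | cons s ss =>
        obtain ⟨r, hr⟩ := join_head s ss
        obtain ⟨hs0, hsal⟩ := hwf s (by rw [hSc]; exact List.mem_cons_self)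
        rw [hSc, hr] at hh
        cases s with
        | nil => exact absurd rfl hs0
        | cons a s' =>
          simp only [List.cons_append, List.head?_cons, Option.some.injEq] at hh
          exact hh ▸ hsal a (by simp)
    · intro l hl
      cases hSc : pvSegsB (PySem.Str.lower value).toList with
      | nil => rw [hSc, PySem.Chars.join_nil] at hl; simp at hl
      | cons s ss =>
        obtain ⟨l', hl', hal⟩ := join_last (s :: ss) (hSc ▸ hwf) (by simp)
        rw [hSc] at hl
        rw [hl] at hl'
        exact (Option.some.inj hl') ▸ hal
    · intro hj; exact hnilt (hJnil.mpr hj)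
  simp only [hstrip]
  by_cases hS0 : pvSegsB (PySem.Str.lower value).toList = []
  · rw [if_pos (hJnil.mp hS0), if_pos hS0]
  · rw [if_neg (fun hj => hS0 (hJnil.mpr hj)), if_neg hS0]
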